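-- pv_equiv track=rewrite | github.com/Galaktikkon/ToC | lab8/utils/trace.py | get_diekert
-- ===== SOURCE A (Python) =====
-- def get_diekert(D: set[tuple[str, str]], word: list[str]) -> dict[str, set[str]]:
--
--     G: dict[str, set[str]] = {}
--
--     for letter in word:
--         G[letter] = set()
--
--     for i, letter in enumerate(word):
--         for j, next_letter in enumerate(word[i:]):
--             for x, y in D:
--                 if x == letter and y == next_letter and word[i] != word[j + i]:
--                     G[word[i]].add(word[j + i])
--
--     return G
-- ===== SOURCE B (Python) =====
-- def get_diekert(D: set[tuple[str, str]], word: list[str]) -> dict[str, set[str]]: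
--     # One left-to-right pass per distinct letter, starting at its first occurrence:
--     # an edge a -> b exists iff (a, b) in D, a != b, and some occurrence of a is at
--     # or before some occurrence of b, i.e. b occurs in word[first[a]:].
--     Dset = set(D)
--     first: dict[str, int] = {}
--     for idx, a in enumerate(word):
--         if a not in first:
--             first[a] = idx
--     G: dict[str, set[str]] = {}
--     for a, fa in first.items():
--         s: set[str] = set()
--         for b in word[fa:]:
--             if b != a and (a, b) in Dset:
--                 s.add(b)
--         G[a] = s
--     return G
-- ===== Notes on version B (the rewrite author's own statement) =====
-- stated objective: faster
-- what changed: Replaces the triple nested scan (every position i, every later position j, every pair of D) by precomputing each letter's first occurrence and doing one guarded pass over the suffix word[first[a]:] per distinct letter, with D turned into a hash set.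
import Mathlib
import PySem

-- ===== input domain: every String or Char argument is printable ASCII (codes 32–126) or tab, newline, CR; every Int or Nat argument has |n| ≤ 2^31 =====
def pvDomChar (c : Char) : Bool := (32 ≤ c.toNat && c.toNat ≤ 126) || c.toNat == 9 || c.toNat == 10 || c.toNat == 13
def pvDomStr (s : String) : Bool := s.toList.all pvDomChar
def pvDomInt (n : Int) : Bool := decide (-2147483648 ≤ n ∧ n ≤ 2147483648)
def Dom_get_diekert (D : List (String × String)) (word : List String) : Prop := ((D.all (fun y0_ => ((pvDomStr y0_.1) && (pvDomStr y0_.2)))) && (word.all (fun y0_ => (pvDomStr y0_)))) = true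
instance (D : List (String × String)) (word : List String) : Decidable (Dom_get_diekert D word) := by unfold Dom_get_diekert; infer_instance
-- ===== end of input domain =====

-- B replaces A's triple nested scan by one guarded pass over word[first[a]:] per distinct
-- letter a, with D held as a set (objective: faster; measured).

-- ===== PORT A =====
-- innermost loop 'for x, y in D: if x == letter and y == next_letter and word[i] != word[j+i]: G[word[i]].add(word[j+i])';
-- by enumerate, word[i] is 'letter' and word[j+i] is 'next_letter', so the indexing is exact,
-- and the key 'letter' is always present in G (every letter of word was inserted), so
-- Dict.modify with a never-used default is exactly G[word[i]].add(...).
def pvStepA (D : List (String × String)) (letter next_letter : String)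
    (G : PySem.Dict String (PySem.Set String)) : PySem.Dict String (PySem.Set String) :=
  D.foldl (fun G xy =>
    if xy.1 == letter && xy.2 == next_letter && letter != next_letter then
      G.modify letter PySem.Set.empty (fun s => PySem.Set.add s next_letter)
    else G) G

-- middle loop 'for j, next_letter in enumerate(word[i:])'
def pvInnerA (D : List (String × String)) (word : List String) (i : Int) (letter : String)
    (G : PySem.Dict String (PySem.Set String)) : PySem.Dict String (PySem.Set String) :=
  (PySem.List.enumerate (PySem.List.slice word (some i))).foldl
    (fun G q => pvStepA D letter q.2 G) G

def get_diekert (D : List (String × String)) (word : List String) : List (String × List String) :=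
  -- G = {}; for letter in word: G[letter] = set()
  let G0 : PySem.Dict String (PySem.Set String) :=
    word.foldl (fun G letter => G.insert letter PySem.Set.empty) PySem.Dict.empty
  -- for i, letter in enumerate(word): ...
  ((PySem.List.enumerate word).foldl (fun G p => pvInnerA D word p.1 p.2 G) G0).items

-- ===== PORT B =====
def get_diekert_alt (D : List (String × String)) (word : List String) : List (String × List String) :=
  -- Dset = set(D)
  let Dset : PySem.Set (String × String) := PySem.Set.ofList D
  -- first = {}; for idx, a in enumerate(word): if a not in first: first[a] = idx
  let first : PySem.Dict String Int :=
    (PySem.List.enumerate word).foldl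
      (fun f p => if !(f.contains p.2) then f.insert p.2 p.1 else f) PySem.Dict.empty
  -- G = {}; for a, fa in first.items(): s = set(); for b in word[fa:]: ...; G[a] = s
  let G : PySem.Dict String (PySem.Set String) :=
    first.items.foldl (fun G af =>
      G.insert af.1
        ((PySem.List.slice word (some af.2)).foldl
          (fun s b => if b != af.1 && PySem.Set.contains Dset (af.1, b) then PySem.Set.add s b else s)
          PySem.Set.empty)) PySem.Dict.empty
  G.items

-- ===== PRECONDITION & SPEC =====
def Spec_get_diekert (D : List (String × String)) (word : List String) (out : List (String × List String)) : Prop := out = get_diekert_alt D word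
instance (D : List (String × String)) (word : List String) (out : List (String × List String)) : Decidable (Spec_get_diekert D word out) := by unfold Spec_get_diekert; infer_instance

-- ===== CLAIM (what is proved, stated in full; the proofs are below) =====
def Claim_equal_get_diekert : Prop := ∀ (D : List (String × String)) (word : List String), Dom_get_diekert D word → Spec_get_diekert D word (get_diekert D word)

-- ===== LEMMAS AND PROOFS =====

-- the guarded add-scan over a letter list: the per-key value both programs compute
def pvGadd (D : List (String × String)) (a : String)
    (s : PySem.Set String) (l : List String) : PySem.Set String :=
  l.foldl (fun s b => if (a, b) ∈ D ∧ ¬ a = b then PySem.Set.add s b else s) s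

-- the suffix of l starting at the first occurrence of a
def pvFsuf (a : String) : List String → List String
  | [] => []
  | x :: t => if x = a then x :: t else pvFsuf a t

-- spec of B's 'first' dict: (letter, index of first occurrence) in first-occurrence order
def pvFitems (seen : List String) (k : Int) : List String → List (String × Int)
  | [] => []
  | x :: t => if x ∈ seen then pvFitems seen (k + 1) t
              else (x, k) :: pvFitems (seen ++ [x]) (k + 1) t

-- A's second loop as structural recursion on the suffix being scanned
def pvGoA (D : List (String × String)) :
    List String → PySem.Dict String (PySem.Set String) → PySem.Dict String (PySem.Set String)
  | [], G => G
  | x :: t, G =>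
    pvGoA D t ((PySem.List.enumerate (x :: t)).foldl (fun G q => pvStepA D x q.2 G) G)

lemma set_add_of_mem {s : PySem.Set String} {x : String} (h : x ∈ s) :
    PySem.Set.add s x = s := by
  simp [PySem.Set.add, h]

lemma set_add_of_not_mem {s : PySem.Set String} {x : String} (h : x ∉ s) :
    PySem.Set.add s x = s ++ [x] := by
  simp [PySem.Set.add, h]

lemma keys_insert (G : PySem.Dict String (PySem.Set String)) (a : String) (v : PySem.Set String) :
    (G.insert a v).keys = PySem.Set.add G.keys a := by
  have h := PySem.Dict.keys_foldl_insert [a] (fun _ _ => v) G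
  simpa using h

lemma items_insert_fresh (d : PySem.Dict String Int) (a : String) (v : Int)
    (h : d.contains a = false) : (d.insert a v).items = d.items ++ [(a, v)] := by
  have := PySem.Dict.items_foldl_insert_fresh [a] (fun x => x) (fun _ => v) d
    (by simpa using h) (by simp)
  simpa using this

lemma mem_pvGadd (D : List (String × String)) (a x : String) :
    ∀ (l : List String) (s : PySem.Set String),
      x ∈ pvGadd D a s l ↔ x ∈ s ∨ (x ∈ l ∧ (a, x) ∈ D ∧ ¬ a = x) := by
  intro l
  induction l with
  | nil => simp [pvGadd]
  | cons b t ih =>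
    intro s
    simp only [pvGadd, List.foldl_cons] at *
    rw [ih]
    by_cases hb : (a, b) ∈ D ∧ ¬ a = b
    · simp only [if_pos hb, PySem.Set.mem_add]
      constructor
      · rintro ((hs | rfl) | h)
        · exact Or.inl hs
        · exact Or.inr ⟨List.mem_cons_self, hb⟩
        · exact Or.inr ⟨List.mem_cons_of_mem _ h.1, h.2⟩
      · rintro (hs | ⟨hm, hd⟩)
        · exact Or.inl (Or.inl hs)
        · rcases List.mem_cons.mp hm with rfl | hm
          · exact Or.inl (Or.inr rfl)
          · exact Or.inr ⟨hm, hd⟩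
    · simp only [if_neg hb]
      constructor
      · rintro (hs | h)
        · exact Or.inl hs
        · exact Or.inr ⟨List.mem_cons_of_mem _ h.1, h.2⟩
      · rintro (hs | ⟨hm, hd⟩)
        · exact Or.inl hs
        · rcases List.mem_cons.mp hm with rfl | hm
          · exact absurd hd hb
          · exact Or.inr ⟨hm, hd⟩

lemma pvGadd_absorb (D : List (String × String)) (a : String)
    (l : List String) (s : PySem.Set String)
    (h : ∀ b ∈ l, (a, b) ∈ D ∧ ¬ a = b → b ∈ s) : pvGadd D a s l = s := by
  induction l generalizing s with
  | nil => rfl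
  | cons b t ih =>
    simp only [pvGadd, List.foldl_cons]
    by_cases hb : (a, b) ∈ D ∧ ¬ a = b
    · rw [if_pos hb, set_add_of_mem (h b List.mem_cons_self hb)]
      exact ih s (fun c hc => h c (List.mem_cons_of_mem _ hc))
    · rw [if_neg hb]
      exact ih s (fun c hc => h c (List.mem_cons_of_mem _ hc))

lemma pvFsuf_suffix (a : String) : ∀ l : List String, pvFsuf a l <:+ l := by
  intro l
  induction l with
  | nil => exact List.nil_suffix
  | cons x t ih =>
    simp only [pvFsuf]
    split
    · exact List.suffix_refl _
    · exact ih.trans (List.suffix_cons x t)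

lemma pvStepA_getD (D : List (String × String)) (a b c : String) :
    ∀ G : PySem.Dict String (PySem.Set String),
      (pvStepA D a b G).getD c PySem.Set.empty =
        if c = a ∧ (a, b) ∈ D ∧ ¬ a = b then
          PySem.Set.add (G.getD c PySem.Set.empty) b
        else G.getD c PySem.Set.empty := by
  induction D with
  | nil => intro G; simp [pvStepA]
  | cons xy t ih =>
    intro G
    simp only [pvStepA, List.foldl_cons] at ih ⊢
    by_cases hm : xy.1 = a ∧ xy.2 = b ∧ ¬ a = b
    · obtain ⟨h1, h2, h3⟩ := hm
      have hg : (xy.1 == a && xy.2 == b && a != b) = true := by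
        simp [h1, h2, bne_iff_ne, h3]
      rw [if_pos hg, ih]
      have hxy : xy = (a, b) := by cases xy; simp_all
      by_cases hc : c = a
      · subst hc
        rw [PySem.Dict.getD_modify_self]
        rw [if_pos (⟨rfl, by rw [hxy]; exact List.mem_cons_self, h3⟩ :
          c = c ∧ (c, b) ∈ xy :: t ∧ ¬ c = b)]
        by_cases h : (c, b) ∈ t
        · rw [if_pos (⟨rfl, h, h3⟩ : c = c ∧ (c, b) ∈ t ∧ ¬ c = b),
            set_add_of_mem ((PySem.Set.mem_add _ _ _).mpr (Or.inr rfl))]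
        · rw [if_neg (by tauto : ¬ (c = c ∧ (c, b) ∈ t ∧ ¬ c = b))]
      · rw [PySem.Dict.getD_modify_of_ne _ _ _ hc]
        simp [hc]
    · have hg : ¬ ((xy.1 == a && xy.2 == b && a != b) = true) := by
        simp only [Bool.and_eq_true, beq_iff_eq, bne_iff_ne, ne_eq]
        tauto
      rw [if_neg hg, ih]
      have hiff : (c = a ∧ (a, b) ∈ xy :: t ∧ ¬ a = b) ↔ (c = a ∧ (a, b) ∈ t ∧ ¬ a = b) := by
        constructor
        · rintro ⟨hc, hmem, hne⟩
          rcases List.mem_cons.mp hmem with heq | hmem'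
          · exact absurd ⟨by rw [← heq], by rw [← heq], hne⟩ hm
          · exact ⟨hc, hmem', hne⟩
        · rintro ⟨hc, hmem, hne⟩
          exact ⟨hc, List.mem_cons_of_mem _ hmem, hne⟩
      simp only [hiff]

lemma pvStepA_contains (D : List (String × String)) (a b : String) (c : String) :
    ∀ (G : PySem.Dict String (PySem.Set String)), G.contains a = true →
    (pvStepA D a b G).contains c = G.contains c := by
  induction D with
  | nil => intro G _; rfl
  | cons xy t ih =>
    intro G ha
    simp only [pvStepA, List.foldl_cons] at ih ⊢
    split
    · rw [ih _ (by simp [PySem.Dict.contains_modify, ha])]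
      rw [PySem.Dict.contains_modify]
      by_cases hc : c = a
      · simp [hc, ha]
      · simp [hc]
    · exact ih G ha

lemma pvStepA_keys (D : List (String × String)) (a b : String) :
    ∀ (G : PySem.Dict String (PySem.Set String)), G.contains a = true →
    (pvStepA D a b G).keys = G.keys := by
  induction D with
  | nil => intro G _; rfl
  | cons xy t ih =>
    intro G ha
    simp only [pvStepA, List.foldl_cons] at ih ⊢
    split
    · rw [ih _ (by simp [PySem.Dict.contains_modify, ha])]
      rw [PySem.Dict.keys_modify, keys_insert,
        set_add_of_mem ((PySem.Dict.contains_iff_mem_keys G a).mp ha)]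
    · exact ih G ha

lemma foldl_enumerate_snd {γ : Type} (f : γ → String → γ) (l : List String) (k : Int) (init : γ) :
    (PySem.List.enumerate l k).foldl (fun acc q => f acc q.2) init = l.foldl f init := by
  show List.foldl (fun acc q => f acc ((fun q : Int × String => q.2) q)) init (PySem.List.enumerate l k) = _
  rw [← List.foldl_map, PySem.List.map_snd_enumerate]

lemma pvMidPlain_getD (D : List (String × String)) (a c : String) :
    ∀ (l : List String) (G : PySem.Dict String (PySem.Set String)),
      (l.foldl (fun G b => pvStepA D a b G) G).getD c PySem.Set.empty =
        if c = a then pvGadd D a (G.getD a PySem.Set.empty) l else G.getD c PySem.Set.empty := by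
  intro l
  induction l with
  | nil =>
    intro G
    by_cases hc : c = a
    · subst hc; simp [pvGadd]
    · simp [hc]
  | cons b t ih =>
    intro G
    simp only [List.foldl_cons]
    rw [ih]
    by_cases hc : c = a
    · subst hc
      rw [if_pos rfl, if_pos rfl, pvStepA_getD D c b c]
      simp only [true_and]
      simp only [pvGadd, List.foldl_cons]
    · rw [if_neg hc, if_neg hc, pvStepA_getD D a b c]
      rw [if_neg (by tauto : ¬ (c = a ∧ (a, b) ∈ D ∧ ¬ a = b))]

lemma pvMid_getD (D : List (String × String)) (a c : String)
    (l : List String) (G : PySem.Dict String (PySem.Set String)) :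
    ((PySem.List.enumerate l).foldl (fun G q => pvStepA D a q.2 G) G).getD c PySem.Set.empty =
      if c = a then pvGadd D a (G.getD a PySem.Set.empty) l else G.getD c PySem.Set.empty := by
  rw [foldl_enumerate_snd (fun G b => pvStepA D a b G) l 0 G]
  exact pvMidPlain_getD D a c l G

lemma pvMid_contains (D : List (String × String)) (a c : String)
    (l : List String) (G : PySem.Dict String (PySem.Set String)) (ha : G.contains a = true) :
    ((PySem.List.enumerate l).foldl (fun G q => pvStepA D a q.2 G) G).contains c = G.contains c := by
  rw [foldl_enumerate_snd (fun G b => pvStepA D a b G) l 0 G]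
  induction l generalizing G with
  | nil => rfl
  | cons b t ih =>
    simp only [List.foldl_cons]
    rw [ih _ (by rw [pvStepA_contains D a b a G ha]; exact ha), pvStepA_contains D a b c G ha]

lemma pvMid_keys (D : List (String × String)) (a : String)
    (l : List String) (G : PySem.Dict String (PySem.Set String)) (ha : G.contains a = true) :
    ((PySem.List.enumerate l).foldl (fun G q => pvStepA D a q.2 G) G).keys = G.keys := by
  rw [foldl_enumerate_snd (fun G b => pvStepA D a b G) l 0 G]
  induction l generalizing G with
  | nil => rfl
  | cons b t ih =>
    simp only [List.foldl_cons]
    rw [ih _ (by rw [pvStepA_contains D a b a G ha]; exact ha), pvStepA_keys D a b G ha]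

lemma pvOuter_eq_goA (D : List (String × String)) (word : List String) :
    ∀ (l : List String) (k : Nat), l = List.drop k word →
      ∀ G, (PySem.List.enumerate l (k : Int)).foldl (fun G p => pvInnerA D word p.1 p.2 G) G =
        pvGoA D l G := by
  intro l
  induction l with
  | nil => intro k _ G; rfl
  | cons x t ih =>
    intro k hl G
    rw [PySem.List.enumerate_cons]
    simp only [List.foldl_cons]
    have hinner : pvInnerA D word (k : Int) x G =
        (PySem.List.enumerate (x :: t)).foldl (fun G q => pvStepA D x q.2 G) G := by
      unfold pvInnerA
      rw [PySem.List.slice_from word (by positivity : (0:Int) ≤ (k:Int))]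
      rw [Int.toNat_natCast, ← hl]
    rw [hinner]
    have ht : t = List.drop (k + 1) word := by
      rw [← List.tail_drop, ← hl]
      rfl
    have hcast : ((k : Int) + 1) = ((k + 1 : Nat) : Int) := by push_cast; ring
    rw [hcast, ih (k + 1) ht]
    rfl

lemma pvGoA_keys (D : List (String × String)) :
    ∀ (l : List String) (G : PySem.Dict String (PySem.Set String)),
      (∀ x ∈ l, G.contains x = true) → (pvGoA D l G).keys = G.keys := by
  intro l
  induction l with
  | nil => intro G _; rfl
  | cons x t ih =>
    intro G h
    show (pvGoA D t _).keys = _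
    rw [ih _ (fun y hy => by
        rw [pvMid_contains D x y (x :: t) G (h x List.mem_cons_self)]
        exact h y (List.mem_cons_of_mem _ hy)),
      pvMid_keys D x (x :: t) G (h x List.mem_cons_self)]

lemma pvGoA_getD (D : List (String × String)) (a : String) :
    ∀ (l : List String) (G : PySem.Dict String (PySem.Set String)),
      (pvGoA D l G).getD a PySem.Set.empty =
        if a ∈ l then pvGadd D a (G.getD a PySem.Set.empty) (pvFsuf a l)
        else G.getD a PySem.Set.empty := by
  intro l
  induction l with
  | nil => intro G; simp [pvGoA]
  | cons x t ih =>
    intro G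
    show (pvGoA D t _).getD a PySem.Set.empty = _
    rw [ih]
    rw [pvMid_getD D x a (x :: t) G]
    by_cases hax : a = x
    · subst hax
      rw [if_pos rfl]
      have hfs : pvFsuf a (a :: t) = a :: t := by simp [pvFsuf]
      rw [if_pos List.mem_cons_self, hfs]
      by_cases hat : a ∈ t
      · rw [if_pos hat]
        apply pvGadd_absorb
        intro b hb hguard
        rw [mem_pvGadd]
        exact Or.inr ⟨List.mem_cons_of_mem _ ((pvFsuf_suffix a t).subset hb), hguard⟩
      · rw [if_neg hat]
    · rw [if_neg hax]
      have hfs : pvFsuf a (x :: t) = pvFsuf a t := by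
        simp only [pvFsuf, if_neg (fun h : x = a => hax h.symm)]
      by_cases hat : a ∈ t
      · rw [if_pos hat, if_pos (List.mem_cons_of_mem _ hat), hfs]
      · rw [if_neg hat, if_neg (by simp [hax, hat])]

lemma pvG0_getD (word : List String) :
    ∀ (d : PySem.Dict String (PySem.Set String)),
      (∀ c, d.getD c PySem.Set.empty = PySem.Set.empty) →
      ∀ c, (word.foldl (fun G letter => G.insert letter PySem.Set.empty) d).getD c PySem.Set.empty
        = PySem.Set.empty := by
  induction word with
  | nil => intro d h c; exact h c
  | cons x t ih =>
    intro d h c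
    simp only [List.foldl_cons]
    refine ih _ (fun c' => ?_) c
    by_cases hc : c' = x
    · subst hc; rw [PySem.Dict.getD_insert_self]
    · rw [PySem.Dict.getD_insert_of_ne _ _ _ hc]; exact h c'

lemma pvFirst_items :
    ∀ (l : List String) (k : Int) (d : PySem.Dict String Int),
      ((PySem.List.enumerate l k).foldl
        (fun f p => if !(f.contains p.2) then f.insert p.2 p.1 else f) d).items =
      d.items ++ pvFitems d.keys k l := by
  intro l
  induction l with
  | nil => intro k d; simp [pvFitems, PySem.List.enumerate]
  | cons x t ih =>
    intro k d
    rw [PySem.List.enumerate_cons]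
    simp only [List.foldl_cons]
    by_cases h : d.contains x = true
    · rw [show (if !(d.contains x) then d.insert x k else d) = d by rw [h]; rfl]
      rw [ih]
      have hx : x ∈ d.keys := (PySem.Dict.contains_iff_mem_keys d x).mp h
      simp only [pvFitems, if_pos hx]
    · have h' : d.contains x = false := by simpa using h
      rw [show (if !(d.contains x) then d.insert x k else d) = d.insert x k by rw [h']; rfl]
      rw [ih]
      have hitems : (d.insert x k).items = d.items ++ [(x, k)] := items_insert_fresh d x k h'
      have hkeys : (d.insert x k).keys = d.keys ++ [x] := by
        simp only [PySem.Dict.keys, hitems, List.map_append, List.map_cons, List.map_nil]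
      have hx : x ∉ d.keys := fun hm =>
        by rw [(PySem.Dict.contains_iff_mem_keys d x).mpr hm] at h'; cases h'
      rw [hitems, hkeys]
      simp only [pvFitems, if_neg hx]
      simp [List.append_assoc]

lemma pvFitems_fst :
    ∀ (l : List String) (seen : List String) (k : Int),
      seen ++ (pvFitems seen k l).map (·.1) = PySem.Set.update seen l := by
  intro l
  induction l with
  | nil => intro seen k; simp [pvFitems, PySem.Set.update]
  | cons x t ih =>
    intro seen k
    have hupd : PySem.Set.update seen (x :: t) = PySem.Set.update (PySem.Set.add seen x) t := by
      simp only [PySem.Set.update, List.foldl_cons]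
    rw [hupd]
    by_cases hx : x ∈ seen
    · simp only [pvFitems, if_pos hx, set_add_of_mem hx]
      exact ih seen (k + 1)
    · simp only [pvFitems, if_neg hx, set_add_of_not_mem hx]
      rw [← ih (seen ++ [x]) (k + 1)]
      simp

lemma pvFitems_spec :
    ∀ (l seen : List String) (k : Int) (af : String × Int), af ∈ pvFitems seen k l →
      k ≤ af.2 ∧ List.drop (af.2 - k).toNat l = pvFsuf af.1 l ∧ af.1 ∉ seen := by
  intro l
  induction l with
  | nil => intro seen k af h; simp [pvFitems] at h
  | cons x t ih =>
    intro seen k af h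
    simp only [pvFitems] at h
    by_cases hx : x ∈ seen
    · rw [if_pos hx] at h
      obtain ⟨h1, h2, h3⟩ := ih seen (k + 1) af h
      have hne : ¬ x = af.1 := fun he => h3 (he ▸ hx)
      refine ⟨by omega, ?_, h3⟩
      have : (af.2 - k).toNat = (af.2 - (k + 1)).toNat + 1 := by omega
      rw [this, List.drop_succ_cons, h2]
      simp only [pvFsuf, if_neg hne]
    · rw [if_neg hx] at h
      rcases List.mem_cons.mp h with rfl | h
      · refine ⟨le_refl _, ?_, hx⟩
        simp [pvFsuf]
      · obtain ⟨h1, h2, h3⟩ := ih (seen ++ [x]) (k + 1) af h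
        have hxa : ¬ x = af.1 := fun he => h3 (by simp [he])
        have hsa : af.1 ∉ seen := fun hm => h3 (by simp [hm])
        refine ⟨by omega, ?_, hsa⟩
        have : (af.2 - k).toNat = (af.2 - (k + 1)).toNat + 1 := by omega
        rw [this, List.drop_succ_cons, h2]
        simp only [pvFsuf, if_neg hxa]

lemma pvScan_eq_gadd (D : List (String × String)) (a : String) :
    ∀ (l : List String) (s : PySem.Set String),
      l.foldl (fun s b =>
          if b != a && PySem.Set.contains (PySem.Set.ofList D) (a, b) then PySem.Set.add s b else s) s
        = pvGadd D a s l := by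
  have hguard : ∀ b, ((b != a && PySem.Set.contains (PySem.Set.ofList D) (a, b)) = true)
      ↔ ((a, b) ∈ D ∧ ¬ a = b) := by
    intro b
    rw [Bool.and_eq_true, bne_iff_ne]
    have hc : PySem.Set.contains (PySem.Set.ofList D) (a, b) = true ↔ (a, b) ∈ D := by
      show List.contains _ _ = true ↔ _
      rw [List.contains_iff_mem, PySem.Set.mem_ofList]
    rw [hc]
    constructor
    · rintro ⟨h1, h2⟩; exact ⟨h2, fun he => h1 he.symm⟩
    · rintro ⟨h1, h2⟩; exact ⟨fun he => h2 he.symm, h1⟩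
  intro l
  induction l with
  | nil => intro s; rfl
  | cons b t ih =>
    intro s
    simp only [pvGadd, List.foldl_cons] at ih ⊢
    by_cases hb : (a, b) ∈ D ∧ ¬ a = b
    · rw [if_pos ((hguard b).mpr hb), if_pos hb, ih]
    · rw [if_neg (fun hg => hb ((hguard b).mp hg)), if_neg hb, ih]

-- both sides equal this normal form
lemma get_diekert_eq_norm (D : List (String × String)) (word : List String) :
    get_diekert D word =
      (PySem.List.dedup word).map (fun a => (a, pvGadd D a PySem.Set.empty (pvFsuf a word))) := by
  unfold get_diekert
  dsimp only
  have houter := pvOuter_eq_goA D word word 0 (by simp)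
    (word.foldl (fun G letter => G.insert letter PySem.Set.empty) PySem.Dict.empty)
  rw [show ((0 : Nat) : Int) = 0 from rfl] at houter
  rw [houter]
  have hkeys0 : (word.foldl (fun G letter => G.insert letter PySem.Set.empty)
      (PySem.Dict.empty : PySem.Dict String (PySem.Set String))).keys = PySem.Set.ofList word := by
    have h := PySem.Dict.keys_foldl_insert (ν := PySem.Set String) word
      (fun _ _ => PySem.Set.empty) PySem.Dict.empty
    simpa [PySem.Dict.keys_empty] using h
  have hcont : ∀ x ∈ word, (word.foldl (fun G letter => G.insert letter PySem.Set.empty)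
      (PySem.Dict.empty : PySem.Dict String (PySem.Set String))).contains x = true := fun x hx =>
    (PySem.Dict.contains_iff_mem_keys _ _).mpr
      (by rw [hkeys0]; exact (PySem.Set.mem_ofList word x).mpr hx)
  have hkeys : (pvGoA D word (word.foldl (fun G letter => G.insert letter PySem.Set.empty)
      PySem.Dict.empty)).keys = PySem.List.dedup word := by
    rw [pvGoA_keys D word _ hcont, hkeys0, ← PySem.List.dedup_eq_ofList]
  have hnd : (pvGoA D word (word.foldl (fun G letter => G.insert letter PySem.Set.empty)
      PySem.Dict.empty)).keys.Nodup := by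
    rw [hkeys]; exact PySem.List.nodup_dedup word
  rw [PySem.Dict.items_eq_map_keys _ hnd PySem.Set.empty, hkeys]
  apply List.map_congr_left
  intro a ha
  have haw : a ∈ word := by
    rw [PySem.List.dedup_eq_ofList] at ha
    exact (PySem.Set.mem_ofList word a).mp ha
  rw [pvGoA_getD, if_pos haw,
    pvG0_getD word PySem.Dict.empty (fun c => PySem.Dict.getD_empty c _) a]

lemma get_diekert_alt_eq_norm (D : List (String × String)) (word : List String) :
    get_diekert_alt D word =
      (PySem.List.dedup word).map (fun a => (a, pvGadd D a PySem.Set.empty (pvFsuf a word))) := by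
  unfold get_diekert_alt
  dsimp only
  have hfi : ((PySem.List.enumerate word).foldl
      (fun f p => if !(f.contains p.2) then f.insert p.2 p.1 else f)
      (PySem.Dict.empty : PySem.Dict String Int)).items = pvFitems [] 0 word := by
    have h := pvFirst_items word 0 PySem.Dict.empty
    simpa [PySem.Dict.keys_empty] using h
  have h2 := PySem.Dict.items_foldl_insert_fresh
    ((PySem.List.enumerate word).foldl
      (fun f p => if !(f.contains p.2) then f.insert p.2 p.1 else f)
      (PySem.Dict.empty : PySem.Dict String Int)).items
    (fun af : String × Int => af.1)
    (fun af : String × Int =>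
      (PySem.List.slice word (some af.2)).foldl
        (fun s b => if b != af.1 && PySem.Set.contains (PySem.Set.ofList D) (af.1, b)
          then PySem.Set.add s b else s) PySem.Set.empty)
    (PySem.Dict.empty : PySem.Dict String (PySem.Set String))
    (fun _ _ => PySem.Dict.contains_empty _)
    (by rw [hfi]
        have h := pvFitems_fst word [] 0
        simp only [List.nil_append] at h
        rw [h, show PySem.Set.update ([] : List String) word = PySem.Set.ofList word from rfl,
          ← PySem.List.dedup_eq_ofList]
        exact PySem.List.nodup_dedup word)
  rw [h2]
  rw [show (PySem.Dict.empty : PySem.Dict String (PySem.Set String)).items = [] from rfl,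
    List.nil_append]
  have hmap : ∀ af ∈ ((PySem.List.enumerate word).foldl
      (fun f p => if !(f.contains p.2) then f.insert p.2 p.1 else f)
      (PySem.Dict.empty : PySem.Dict String Int)).items,
      ((fun af : String × Int => (af.1,
        (PySem.List.slice word (some af.2)).foldl
          (fun s b => if b != af.1 && PySem.Set.contains (PySem.Set.ofList D) (af.1, b)
            then PySem.Set.add s b else s) PySem.Set.empty)) af)
        = ((fun af : String × Int => (af.1, pvGadd D af.1 PySem.Set.empty (pvFsuf af.1 word))) af) := by
    intro af hmem
    rw [hfi] at hmem
    obtain ⟨h1, h2, _⟩ := pvFitems_spec word [] 0 af hmem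
    rw [Int.sub_zero] at h2
    dsimp only
    rw [PySem.List.slice_from word h1, h2, pvScan_eq_gadd]
  rw [List.map_congr_left hmap]
  rw [show (fun af : String × Int => (af.1, pvGadd D af.1 PySem.Set.empty (pvFsuf af.1 word)))
      = ((fun a : String => (a, pvGadd D a PySem.Set.empty (pvFsuf a word))) ∘ (fun af : String × Int => af.1)) from rfl,
    ← List.map_map, hfi]
  have h := pvFitems_fst word [] 0
  simp only [List.nil_append] at h
  rw [show ((fun af : String × Int => af.1) : String × Int → String) = (·.1) from rfl, h,
    show PySem.Set.update ([] : List String) word = PySem.Set.ofList word from rfl,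
    ← PySem.List.dedup_eq_ofList]

-- ===== VERDICT (by name: the statement is the Claim_ definition above) =====
theorem get_diekert_spec : Claim_equal_get_diekert := by
  intro D word _
  unfold Spec_get_diekert
  rw [get_diekert_eq_norm, get_diekert_alt_eq_norm]
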